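-- pv_equiv track=rewrite | github.com/IKdotShark/IPT | lab5/lab5.py | can_be_represented
-- ===== SOURCE A (Python) =====
-- import math
--
-- def can_be_represented(d, k):
--     """Проверяет, можно ли представить число d в виде u² + kv²"""
--     if d == 1:
--         return True  # 1 = 1² + k×0²
--
--     if k == 3 and d == 2:
--         return False  # Специальный исключенный случай
--
--     max_u = int(math.isqrt(d)) + 1
--     for u in range(max_u):
--         remaining = d - u * u
--         if remaining < 0:
--             continue
--         if remaining % k != 0:
--             continue
--         v_squared = remaining // k
--         v = math.isqrt(v_squared)
--         if v * v == v_squared: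
--             return True
--     return False
-- ===== SOURCE B (Python) =====
-- import math
--
-- def can_be_represented(d, k):
--     """Проверяет, можно ли представить число d в виде u² + kv²"""
--     v = 0
--     while k * v * v <= d:
--         remaining = d - k * v * v
--         r = math.isqrt(remaining)
--         if r * r == remaining:
--             return True
--         v += 1
--     return False
-- ===== Notes on version B (the rewrite author's own statement) =====
-- stated objective: alternative
-- what changed: B enumerates v (the coefficient-k variable) and tests d - k*v*v for squareness directly with isqrt, instead of A's enumeration of u with a modulo/division step; A's d==1 and k==3/d==2 special-case guards are dropped as redundant.
-- outside the precondition, e.g. on can_be_represented(2, -3): A returns False, B does not finish within the time limit; on can_be_represented(1, 0): A returns True, B returns True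
import Mathlib
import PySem

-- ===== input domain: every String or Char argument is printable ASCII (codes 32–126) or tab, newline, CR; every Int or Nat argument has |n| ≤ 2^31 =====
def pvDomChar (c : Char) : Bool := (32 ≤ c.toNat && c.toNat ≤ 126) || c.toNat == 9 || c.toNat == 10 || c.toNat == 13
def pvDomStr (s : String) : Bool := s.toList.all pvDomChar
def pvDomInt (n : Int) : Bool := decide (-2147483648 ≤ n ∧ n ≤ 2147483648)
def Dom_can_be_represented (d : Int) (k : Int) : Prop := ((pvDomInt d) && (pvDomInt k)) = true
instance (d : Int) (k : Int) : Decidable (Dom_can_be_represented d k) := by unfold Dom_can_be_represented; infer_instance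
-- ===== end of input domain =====

-- B enumerates v and tests d - k*v*v for squareness directly (no modulo/division step,
-- no special-case guards); objective: alternative decomposition of the same search.


-- ===== PORT A =====
-- the for-u loop with its early `return True`; `continue` = recurse on the rest
def canRepA_loop (d : Int) (k : Int) : List Nat → Bool
  | [] => false
  | u :: rest =>
      let remaining := d - (u : Int) * (u : Int)
      if remaining < 0 then canRepA_loop d k rest
      else if PySem.Int.mod remaining k ≠ 0 then canRepA_loop d k rest
      else
        let v_squared := PySem.Int.floordiv remaining k
        -- math.isqrt(v_squared); exact for v_squared ≥ 0 (isqrt raises on negatives, outside Pre_)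
        let v : Int := ((Nat.sqrt v_squared.toNat : Nat) : Int)
        if v * v = v_squared then true else canRepA_loop d k rest

def can_be_represented (d : Int) (k : Int) : Bool :=
  if d = 1 then true
  else if k = 3 ∧ d = 2 then false
  else
    -- max_u = int(math.isqrt(d)) + 1; exact for d ≥ 0 (isqrt raises on d < 0, outside Pre_)
    canRepA_loop d k (List.range (Nat.sqrt d.toNat + 1))

-- ===== PORT B =====
-- the while-v loop; fuel d.toNat + 1 only makes it total, it is never the reason the
-- loop stops inside Pre_ (with k ≥ 1 the loop runs at most isqrt(d) + 1 ≤ d + 1 times)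
def canRepB_loop (d : Int) (k : Int) : Nat → Nat → Bool
  | 0, _ => false
  | fuel + 1, v =>
      if k * (v : Int) * (v : Int) ≤ d then
        let remaining := d - k * (v : Int) * (v : Int)
        let r : Int := ((Nat.sqrt remaining.toNat : Nat) : Int)  -- math.isqrt(remaining), remaining ≥ 0 here
        if r * r = remaining then true else canRepB_loop d k fuel (v + 1)
      else false

def can_be_represented_alt (d : Int) (k : Int) : Bool := canRepB_loop d k (d.toNat + 1) 0

-- ===== PRECONDITION & SPEC =====
-- Pre_ restricts to the natural domain of 'd = u² + k·v²': A raises ValueError (isqrt of a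
-- negative) for d < 0 and ZeroDivisionError for k = 0 unless d = 1; for k < 0 A's behaviour
-- (a mix of raises and accidental values from floor-mod arithmetic) is outside the problem's
-- sense and B's loop does not terminate there.
def Pre_can_be_represented (d : Int) (k : Int) : Prop := 0 ≤ d ∧ 1 ≤ k
instance (d : Int) (k : Int) : Decidable (Pre_can_be_represented d k) := by unfold Pre_can_be_represented; infer_instance
def pvWitness_can_be_represented : Int × Int := (9, 2)

def Spec_can_be_represented (d : Int) (k : Int) (out : Bool) : Prop := out = can_be_represented_alt d k
instance (d : Int) (k : Int) (out : Bool) : Decidable (Spec_can_be_represented d k out) := by unfold Spec_can_be_represented; infer_instance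

-- ===== CLAIM (what is proved, stated in full; the proofs are below) =====
def Claim_equal_can_be_represented : Prop := ∀ (d : Int) (k : Int), Dom_can_be_represented d k → Pre_can_be_represented d k → Spec_can_be_represented d k (can_be_represented d k)

-- ===== LEMMAS AND PROOFS =====

-- d is representable as u² + k·v²
def PyRep (d : Int) (k : Int) : Prop := ∃ u v : Nat, (u : Int) * u + k * ((v : Int) * v) = d

-- the isqrt-based perfect-square test is exactly "is a square of a natural"
theorem sq_test (r : Int) (hr : 0 ≤ r) :
    ((Nat.sqrt r.toNat : Nat) : Int) * ((Nat.sqrt r.toNat : Nat) : Int) = r ↔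
      ∃ m : Nat, (m : Int) * m = r := by
  constructor
  · intro h; exact ⟨_, h⟩
  · rintro ⟨m, hm⟩
    have h1 : ((m * m : Nat) : Int) = r := by push_cast; linarith
    have h2 : r.toNat = m * m := by omega
    rw [h2, Nat.sqrt_eq]; exact hm

-- the body test of A's loop, characterised (k ≥ 1)
theorem A_hit_iff (d k : Int) (hk : 1 ≤ k) (u : Nat) :
    (let remaining := d - (u : Int) * (u : Int)
     ¬ remaining < 0 ∧ PySem.Int.mod remaining k = 0 ∧
       ((Nat.sqrt (PySem.Int.floordiv remaining k).toNat : Nat) : Int) *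
         ((Nat.sqrt (PySem.Int.floordiv remaining k).toNat : Nat) : Int) =
           PySem.Int.floordiv remaining k)
      ↔ ∃ m : Nat, (u : Int) * u + k * ((m : Int) * m) = d := by
  simp only []
  set r := d - (u : Int) * (u : Int) with hr
  rw [PySem.Int.mod_eq_emod_of_pos (by omega : (0:Int) < k), PySem.Int.floordiv_eq_ediv_of_pos (by omega : (0:Int) < k)]
  constructor
  · rintro ⟨hnn, hmod, hsq⟩
    have hdvd : k ∣ r := Int.dvd_of_emod_eq_zero hmod
    obtain ⟨c, hc⟩ := hdvd
    have hkne : k ≠ 0 := by omega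
    have hdiv : r / k = c := by rw [hc, Int.mul_ediv_cancel_left _ hkne]
    rw [hdiv] at hsq
    have hc0 : 0 ≤ c := by
      by_contra hcn
      have : k * c < 0 := mul_neg_of_pos_of_neg (by omega) (by omega)
      omega
    obtain ⟨m, hm⟩ := (sq_test c hc0).mp hsq
    exact ⟨m, by rw [← hm] at hc; omega⟩
  · rintro ⟨m, hm⟩
    have hc : r = k * ((m : Int) * m) := by omega
    have hm0 : (0 : Int) ≤ (m : Int) * m := by positivity
    have hnn : ¬ r < 0 := by nlinarith
    have hkne : k ≠ 0 := by omega
    have hmod : r % k = 0 := by rw [hc]; exact Int.mul_emod_right _ _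
    have hdiv : r / k = (m : Int) * m := by rw [hc, Int.mul_ediv_cancel_left _ hkne]
    refine ⟨hnn, hmod, ?_⟩
    rw [hdiv]
    exact (sq_test _ hm0).mpr ⟨m, rfl⟩

theorem canRepA_loop_iff (d k : Int) (hk : 1 ≤ k) (us : List Nat) :
    canRepA_loop d k us = true ↔
      ∃ u ∈ us, ∃ m : Nat, (u : Int) * u + k * ((m : Int) * m) = d := by
  induction us with
  | nil => simp [canRepA_loop]
  | cons u rest ih =>
    simp only [canRepA_loop, List.mem_cons]
    by_cases h1 : d - (u : Int) * (u : Int) < 0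
    · have hnohit : ¬ ∃ m : Nat, (u : Int) * u + k * ((m : Int) * m) = d := by
        intro h; have := (A_hit_iff d k hk u).mpr h; exact this.1 h1
      simp only [if_pos h1, ih]
      constructor
      · rintro ⟨v, hv, m, hm⟩; exact ⟨v, Or.inr hv, m, hm⟩
      · rintro ⟨v, hv | hv, m, hm⟩
        · exact absurd ⟨m, hv ▸ hm⟩ hnohit
        · exact ⟨v, hv, m, hm⟩
    · simp only [if_neg h1]
      by_cases h2 : PySem.Int.mod (d - (u : Int) * (u : Int)) k = 0
      · simp only [if_neg (show ¬ PySem.Int.mod (d - (u : Int) * (u : Int)) k ≠ 0 by simp [h2])]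
        by_cases h3 : ((Nat.sqrt (PySem.Int.floordiv (d - (u : Int) * (u : Int)) k).toNat : Nat) : Int) *
            ((Nat.sqrt (PySem.Int.floordiv (d - (u : Int) * (u : Int)) k).toNat : Nat) : Int) =
              PySem.Int.floordiv (d - (u : Int) * (u : Int)) k
        · simp only [if_pos h3, true_iff]
          obtain ⟨m, hm⟩ := (A_hit_iff d k hk u).mp ⟨h1, h2, h3⟩
          exact ⟨u, Or.inl rfl, m, hm⟩
        · have hnohit : ¬ ∃ m : Nat, (u : Int) * u + k * ((m : Int) * m) = d := by
            intro h; exact h3 ((A_hit_iff d k hk u).mpr h).2.2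
          simp only [if_neg h3, ih]
          constructor
          · rintro ⟨v, hv, m, hm⟩; exact ⟨v, Or.inr hv, m, hm⟩
          · rintro ⟨v, hv | hv, m, hm⟩
            · exact absurd ⟨m, hv ▸ hm⟩ hnohit
            · exact ⟨v, hv, m, hm⟩
      · have hnohit : ¬ ∃ m : Nat, (u : Int) * u + k * ((m : Int) * m) = d := by
          intro h; exact h2 ((A_hit_iff d k hk u).mpr h).2.1
        simp only [if_pos h2, ih]
        constructor
        · rintro ⟨v, hv, m, hm⟩; exact ⟨v, Or.inr hv, m, hm⟩
        · rintro ⟨v, hv | hv, m, hm⟩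
          · exact absurd ⟨m, hv ▸ hm⟩ hnohit
          · exact ⟨v, hv, m, hm⟩

theorem canRepA_iff (d k : Int) (hd : 0 ≤ d) (hk : 1 ≤ k) :
    can_be_represented d k = true ↔ PyRep d k := by
  unfold can_be_represented PyRep
  by_cases hd1 : d = 1
  · simp only [if_pos hd1, true_iff]
    exact ⟨1, 0, by simp [hd1]⟩
  · simp only [if_neg hd1]
    by_cases hsp : k = 3 ∧ d = 2
    · simp only [if_pos hsp, Bool.false_eq_true, false_iff]
      rintro ⟨u, v, huv⟩
      obtain ⟨hk3, hd2⟩ := hsp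
      subst hk3; subst hd2
      have h : (u : Int) * u + 3 * ((v : Int) * v) = ((u * u + 3 * (v * v) : Nat) : Int) := by
        push_cast; ring
      rw [h] at huv
      have hn : u * u + 3 * (v * v) = 2 := by exact_mod_cast huv
      have hv : v = 0 := by nlinarith
      subst hv
      have hu2 : u * u = 2 := by omega
      have : u ≤ 1 := by nlinarith
      interval_cases u <;> omega
    · simp only [if_neg hsp]
      rw [canRepA_loop_iff d k hk]
      constructor
      · rintro ⟨u, _, m, hm⟩; exact ⟨u, m, hm⟩
      · rintro ⟨u, v, huv⟩
        refine ⟨u, ?_, v, huv⟩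
        rw [List.mem_range, Nat.lt_succ_iff, Nat.le_sqrt]
        have hv0 : (0 : Int) ≤ k * ((v : Int) * v) := by positivity
        have : (u : Int) * u ≤ d := by omega
        have h2 : ((u * u : Nat) : Int) ≤ d := by push_cast; linarith
        omega

theorem canRepB_loop_iff (d k : Int) (hk : 1 ≤ k) (fuel v : Nat) :
    canRepB_loop d k fuel v = true ↔
      ∃ j : Nat, v ≤ j ∧ j < v + fuel ∧ k * (j : Int) * j ≤ d ∧
        ∃ m : Nat, (m : Int) * m = d - k * (j : Int) * j := by
  induction fuel generalizing v with
  | zero =>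
    simp only [canRepB_loop, Bool.false_eq_true, false_iff]
    rintro ⟨j, hj1, hj2, -⟩; omega
  | succ fuel ih =>
    simp only [canRepB_loop]
    by_cases hc : k * (v : Int) * (v : Int) ≤ d
    · simp only [if_pos hc]
      by_cases hs : ((Nat.sqrt (d - k * (v : Int) * (v : Int)).toNat : Nat) : Int) *
          ((Nat.sqrt (d - k * (v : Int) * (v : Int)).toNat : Nat) : Int) =
            d - k * (v : Int) * (v : Int)
      · simp only [if_pos hs, true_iff]
        exact ⟨v, le_refl v, by omega, hc, ⟨_, hs⟩⟩
      · simp only [if_neg hs, ih]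
        have hnosq : ¬ ∃ m : Nat, (m : Int) * m = d - k * (v : Int) * (v : Int) := by
          rintro ⟨m, hm⟩
          exact hs ((sq_test _ (by omega)).mpr ⟨m, hm⟩)
        constructor
        · rintro ⟨j, hj1, hj2, hj3, hm⟩; exact ⟨j, by omega, by omega, hj3, hm⟩
        · rintro ⟨j, hj1, hj2, hj3, hm⟩
          rcases Nat.eq_or_lt_of_le hj1 with heq | hlt
          · exact absurd (heq ▸ hm) hnosq
          · exact ⟨j, hlt, by omega, hj3, hm⟩
    · simp only [if_neg hc]
      constructor
      · intro h; simp at h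
      · rintro ⟨j, hj1, _, hj3, _⟩
        have hmono : k * (v : Int) * v ≤ k * (j : Int) * j := by
          have hvj : (v : Int) ≤ j := by exact_mod_cast hj1
          have h0v : (0 : Int) ≤ v := by positivity
          have hk0 : (0 : Int) ≤ k := by omega
          have h1 : (v : Int) * v ≤ (j : Int) * j := by nlinarith
          nlinarith [mul_le_mul_of_nonneg_left h1 hk0]
        exact ((hc (le_trans hmono hj3)).elim)

theorem canRepB_iff (d k : Int) (hd : 0 ≤ d) (hk : 1 ≤ k) :
    can_be_represented_alt d k = true ↔ PyRep d k := by
  unfold can_be_represented_alt PyRep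
  rw [canRepB_loop_iff d k hk]
  constructor
  · rintro ⟨j, _, _, _, m, hm⟩
    exact ⟨m, j, by linarith [hm]⟩
  · rintro ⟨u, v, huv⟩
    have hu0 : (0 : Int) ≤ (u : Int) * u := by positivity
    have hkv : k * (v : Int) * v ≤ d := by nlinarith [hu0, huv]
    have hvv : ((v * v : Nat) : Int) ≤ d := by
      have hv0 : (0 : Int) ≤ (v : Int) * v := by positivity
      have h1 : (1 : Int) * ((v : Int) * v) ≤ k * ((v : Int) * v) :=
        mul_le_mul_of_nonneg_right (by omega) hv0
      push_cast
      nlinarith [h1, hkv]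
    have hvd : v * v ≤ d.toNat := by omega
    have hvle : v ≤ d.toNat := by
      rcases Nat.eq_zero_or_pos v with h | h
      · omega
      · exact le_trans (Nat.le_mul_of_pos_left v h) hvd
    exact ⟨v, by omega, by omega, hkv, u, by linarith [huv]⟩

-- ===== VERDICT (by name: the statement is the Claim_ definition above) =====
theorem can_be_represented_spec : Claim_equal_can_be_represented := by
  intro d k _ hpre
  obtain ⟨hd, hk⟩ := hpre
  unfold Spec_can_be_represented
  rw [Bool.eq_iff_iff, canRepA_iff d k hd hk, canRepB_iff d k hd hk]
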